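-- pv_equiv track=rewrite | github.com/SY97P/Daily_Algo_Exercise | daily_algo/프로그래머스/lv3/모두_0으로_만들기.py | solution
-- ===== SOURCE A (Python) =====
-- def solution(a, edges):
--     n = len(a)
--     adj = [[] for _ in range(n)]
--     for u, v in edges:
--         adj[u].append(v)
--         adj[v].append(u)
--     visited = [False] * n
--     visited[0] = True
--
--     def solve(node):
--         w, c = a[node], 0
--         for next_node in adj[node]:
--             if not visited[next_node]:
--                 visited[next_node] = True
--                 rtn = solve(next_node)
--                 w += rtn[0]
--                 c += rtn[1]
--         return w, abs(w)+c
--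
--     answer = solve(0)
--     return answer[1] if answer[0] == 0 else -1
-- ===== SOURCE B (Python) =====
-- def solution(a, edges):
--     n = len(a)
--     adj = [[] for _ in range(n)]
--     for u, v in edges:
--         adj[u].append(v)
--         adj[v].append(u)
--     visited = [False] * n
--     visited[0] = True
--     order = []  # (node, parent) pairs in discovery order
--
--     def dfs(node):
--         for nxt in adj[node]:
--             if not visited[nxt]:
--                 visited[nxt] = True
--                 order.append((nxt, node))
--                 dfs(nxt)
--
--     dfs(0)
--     sub = list(a)
--     ans = 0
--     for v, p in reversed(order):
--         ans += abs(sub[v])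
--         sub[p] += sub[v]
--     ans += abs(sub[0])
--     return ans if sub[0] == 0 else -1
-- ===== Notes on version B (the rewrite author's own statement) =====
-- stated objective: alternative
-- what changed: A computes the answer in one recursive DFS that returns and combines (subtree-sum, cost) pairs on the way back up; B instead records (node, parent) pairs in discovery order during the traversal and then computes all subtree sums and the answer in a separate reverse array sweep over that order.
import Mathlib
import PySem

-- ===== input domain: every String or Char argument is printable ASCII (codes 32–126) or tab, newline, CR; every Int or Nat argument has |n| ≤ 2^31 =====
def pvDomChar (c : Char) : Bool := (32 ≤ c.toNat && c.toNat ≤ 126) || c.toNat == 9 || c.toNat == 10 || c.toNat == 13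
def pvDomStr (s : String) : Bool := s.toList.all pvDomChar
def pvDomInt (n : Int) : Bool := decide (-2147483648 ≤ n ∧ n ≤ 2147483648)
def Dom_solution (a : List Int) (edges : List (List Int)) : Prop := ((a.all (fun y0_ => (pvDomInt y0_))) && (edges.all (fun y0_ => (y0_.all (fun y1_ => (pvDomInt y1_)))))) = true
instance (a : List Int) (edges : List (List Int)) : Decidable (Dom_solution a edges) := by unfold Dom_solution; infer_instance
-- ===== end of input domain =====

-- B replaces A's single recursive pass computing (subtree-sum, cost) pairs by a discovery pass
-- recording (node, parent) pairs plus a reverse array sweep accumulating the answer (objective: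
-- alternative decomposition, same asymptotic cost). Equivalence is about the return value.

-- shared helpers (both Python versions contain these identical lines)
-- Python abs on int
def pyabs (x : Int) : Int := if x < 0 then -x else x

-- Python list index semantics for `adj[i]` / `a[i]` / `visited[i]`: a negative index wraps.
-- Under Pre_ every index is in [-n, n), so normalising once at adjacency-build time is exact.
def normIdx (n : Nat) (i : Int) : Nat := (if i < 0 then i + n else i).toNat

-- adj[u].append(v)
def addEdge (adj : List (List Nat)) (u v : Nat) : List (List Nat) :=
  adj.set u ((adj.getD u []) ++ [v])

-- adj = [[] for _ in range(n)]; for u, v in edges: adj[u].append(v); adj[v].append(u)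
def buildAdj (n : Nat) (edges : List (List Int)) : List (List Nat) :=
  edges.foldl (fun adj e =>
    match e with
    | [u, v] => addEdge (addEdge adj (normIdx n u) (normIdx n v)) (normIdx n v) (normIdx n u)
    | _ => adj) (List.replicate n [])

-- ===== PORT A =====
-- def solve(node): w, c = a[node], 0; for next_node in adj[node]: ...; return w, abs(w)+c
-- fuel = n is always sufficient: each recursive descent marks one more node visited.
def solveA (a : List Int) (adj : List (List Nat)) : Nat → Nat → List Bool → (Int × Int) × List Bool
  | 0, _, vis => ((0, 0), vis)
  | fuel+1, node, vis =>
    let s := (adj.getD node []).foldl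
      (fun (s : Int × Int × List Bool) nxt =>
        if s.2.2.getD nxt true then s
        else
          let r := solveA a adj fuel nxt (s.2.2.set nxt true)
          (s.1 + r.1.1, s.2.1 + r.1.2, r.2))
      (a.getD node 0, 0, vis)
    ((s.1, pyabs s.1 + s.2.1), s.2.2)

def solution (a : List Int) (edges : List (List Int)) : Int :=
  let n := a.length
  let adj := buildAdj n edges
  let vis := (List.replicate n false).set 0 true
  let r := solveA a adj n 0 vis
  if r.1.1 = 0 then r.1.2 else -1

-- ===== PORT B =====
-- def dfs(node): for nxt in adj[node]: if not visited[nxt]: mark; order.append((nxt, node)); dfs(nxt)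
def dfsB (adj : List (List Nat)) : Nat → Nat → List Bool × List (Nat × Nat) → List Bool × List (Nat × Nat)
  | 0, _, s => s
  | fuel+1, node, s =>
    (adj.getD node []).foldl
      (fun (s : List Bool × List (Nat × Nat)) nxt =>
        if s.1.getD nxt true then s
        else dfsB adj fuel nxt (s.1.set nxt true, s.2 ++ [(nxt, node)]))
      s

-- one step of: for v, p in reversed(order): ans += abs(sub[v]); sub[p] += sub[v]
def sweepStep (st : List Int × Int) (vp : Nat × Nat) : List Int × Int :=
  (st.1.set vp.2 (st.1.getD vp.2 0 + st.1.getD vp.1 0), st.2 + pyabs (st.1.getD vp.1 0))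

def solution_alt (a : List Int) (edges : List (List Int)) : Int :=
  let n := a.length
  let adj := buildAdj n edges
  let vis := (List.replicate n false).set 0 true
  let r := dfsB adj n 0 (vis, [])
  let st := r.2.reverse.foldl sweepStep (a, 0)
  let total := st.1.getD 0 0
  let ans := st.2 + pyabs total
  if total = 0 then ans else -1

-- ===== PRECONDITION & SPEC =====
-- Pre_ is exactly where the Python A returns normally: a nonempty (else visited[0] raises
-- IndexError) and every edge a 2-element list of indices in [-n, n) (else unpacking raises
-- ValueError or adj[u] raises IndexError).
def Pre_solution (a : List Int) (edges : List (List Int)) : Prop :=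
  a ≠ [] ∧ ∀ e ∈ edges, e.length = 2 ∧ ∀ x ∈ e, -(a.length : Int) ≤ x ∧ x < (a.length : Int)

instance (a : List Int) (edges : List (List Int)) : Decidable (Pre_solution a edges) := by
  unfold Pre_solution; infer_instance

def pvWitness_solution : List Int × List (List Int) := ([4, -3, -1], [[0, 1], [0, 2]])

def Spec_solution (a : List Int) (edges : List (List Int)) (out : Int) : Prop := out = solution_alt a edges
instance (a : List Int) (edges : List (List Int)) (out : Int) : Decidable (Spec_solution a edges out) := by unfold Spec_solution; infer_instance

-- ===== CLAIM (what is proved, stated in full; the proofs are below) =====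
def Claim_equal_solution : Prop := ∀ (a : List Int) (edges : List (List Int)), Dom_solution a edges → Pre_solution a edges → Spec_solution a edges (solution a edges)

-- ===== LEMMAS AND PROOFS =====

-- the loop body of A's solve
def stepA (a : List Int) (adj : List (List Nat)) (fuel : Nat)
    (s : Int × Int × List Bool) (nxt : Nat) : Int × Int × List Bool :=
  if s.2.2.getD nxt true then s
  else
    let r := solveA a adj fuel nxt (s.2.2.set nxt true)
    (s.1 + r.1.1, s.2.1 + r.1.2, r.2)

-- the loop body of B's dfs
def stepB (adj : List (List Nat)) (fuel : Nat) (node : Nat)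
    (s : List Bool × List (Nat × Nat)) (nxt : Nat) : List Bool × List (Nat × Nat) :=
  if s.1.getD nxt true then s
  else dfsB adj fuel nxt (s.1.set nxt true, s.2 ++ [(nxt, node)])

theorem solveA_succ (a : List Int) (adj : List (List Nat)) (fuel node : Nat) (vis : List Bool) :
    solveA a adj (fuel+1) node vis =
      (fun s => ((s.1, pyabs s.1 + s.2.1), s.2.2))
        ((adj.getD node []).foldl (stepA a adj fuel) (a.getD node 0, 0, vis)) := rfl

theorem dfsB_succ (adj : List (List Nat)) (fuel node : Nat) (s : List Bool × List (Nat × Nat)) :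
    dfsB adj (fuel+1) node s = (adj.getD node []).foldl (stepB adj fuel node) s := rfl

-- what one traversal (A's solve / B's dfs) guarantees, relative to its entry state
def Post (a : List Int) (adj : List (List Nat)) (vis : List Bool) (ord : List (Nat × Nat))
    (node : Nat) (w0 w1 c0 c1 : Int) (vis1 : List Bool)
    (res : List Bool × List (Nat × Nat)) : Prop :=
  ∃ L : List (Nat × Nat),
    res = (vis1, ord ++ L)
    ∧ vis1.length = vis.length
    ∧ (∀ x, vis1.getD x true = true ↔ (vis.getD x true = true ∨ x ∈ L.map Prod.fst))
    ∧ vis1.count false + (L.map Prod.fst).length = vis.count false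
    ∧ (∀ vp ∈ L, vp.1 < adj.length ∧ vis.getD vp.1 true = false)
    ∧ (L.map Prod.fst).Nodup
    ∧ (L.map (fun vp => a.getD vp.1 0)).sum = w1 - w0
    ∧ ∀ (sub : List Int) (ans : Int), sub.length = adj.length →
        (∀ vp ∈ L, sub.getD vp.1 0 = a.getD vp.1 0) →
        (L.reverse.foldl sweepStep (sub, ans)).2 = ans + (c1 - c0)
        ∧ (L.reverse.foldl sweepStep (sub, ans)).1.getD node 0
            = sub.getD node 0 + (w1 - w0)
        ∧ (∀ x, x ∉ L.map Prod.fst → x ≠ node →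
            (L.reverse.foldl sweepStep (sub, ans)).1.getD x 0 = sub.getD x 0)
        ∧ (L.reverse.foldl sweepStep (sub, ans)).1.length = sub.length

def MainP (a : List Int) (adj : List (List Nat)) (fuel : Nat) : Prop :=
  ∀ (node : Nat) (vis : List Bool) (ord : List (Nat × Nat)),
    vis.length = adj.length →
    node < adj.length →
    vis.getD node true = true →
    vis.count false < fuel →
    Post a adj vis ord node (a.getD node 0) (solveA a adj fuel node vis).1.1
      0 ((solveA a adj fuel node vis).1.2 - pyabs (solveA a adj fuel node vis).1.1)
      (solveA a adj fuel node vis).2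
      (dfsB adj fuel node (vis, ord))

-- ---- small getD / count helpers ----

theorem getD_set_self' {α : Type} (l : List α) (i : Nat) (v d : α) (h : i < l.length) :
    (l.set i v).getD i d = v := by
  simp [List.getD_eq_getElem?_getD, List.getElem?_set_self h]

theorem getD_set_ne' {α : Type} (l : List α) {i j : Nat} (v d : α) (h : i ≠ j) :
    (l.set i v).getD j d = l.getD j d := by
  simp [List.getD_eq_getElem?_getD, List.getElem?_set_ne h]

theorem lt_of_getD_false {l : List Bool} {i : Nat} (h : l.getD i true = false) :
    i < l.length := by
  by_contra hh
  rw [List.getD_eq_default l true (by omega)] at h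
  cases h

theorem count_false_set_true (vis : List Bool) (i : Nat) (h : vis.getD i true = false) :
    (vis.set i true).count false + 1 = vis.count false := by
  induction vis generalizing i with
  | nil => exact absurd (lt_of_getD_false h) (by simp)
  | cons b t ih =>
    cases i with
    | zero =>
      rw [List.getD_cons_zero] at h
      subst h
      simp
    | succ n =>
      rw [List.getD_cons_succ] at h
      have := ih n h
      simp only [List.set_cons_succ, List.count_cons]
      omega

theorem getD_adj_bound {m : Nat} (adj : List (List Nat))
    (H : ∀ l ∈ adj, ∀ x ∈ l, x < m) (u : Nat) :
    ∀ x ∈ adj.getD u [], x < m := by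
  intro x hx
  rcases Nat.lt_or_ge u adj.length with h | h
  · rw [List.getD_eq_getElem?_getD, List.getElem?_eq_getElem h] at hx
    exact H _ (List.getElem_mem h) x hx
  · rw [List.getD_eq_default _ _ h] at hx
    cases hx

-- ---- buildAdj facts ----

theorem addEdge_length (adj : List (List Nat)) (u v : Nat) :
    (addEdge adj u v).length = adj.length := by
  simp [addEdge]

theorem addEdge_bound {m : Nat} (adj : List (List Nat)) (u v : Nat)
    (H : ∀ l ∈ adj, ∀ x ∈ l, x < m) (hv : v < m) :
    ∀ l ∈ addEdge adj u v, ∀ x ∈ l, x < m := by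
  intro l hl x hx
  rcases List.mem_or_eq_of_mem_set hl with h | rfl
  · exact H _ h x hx
  · rcases List.mem_append.1 hx with h | h
    · exact getD_adj_bound adj H u x h
    · simp at h; omega

theorem normIdx_lt (n : Nat) (i : Int) (h1 : -(n : Int) ≤ i) (h2 : i < (n : Int)) :
    normIdx n i < n := by
  unfold normIdx
  split <;> omega

theorem buildAdj_aux_length (edges : List (List Int))
    (f : List (List Nat) → List Int → List (List Nat))
    (hf : ∀ acc e, (f acc e).length = acc.length) :
    ∀ acc : List (List Nat), (edges.foldl f acc).length = acc.length := by
  induction edges with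
  | nil => intro acc; rfl
  | cons e t ih => intro acc; rw [List.foldl_cons, ih, hf]

theorem buildAdj_length (n : Nat) (edges : List (List Int)) :
    (buildAdj n edges).length = n := by
  unfold buildAdj
  rw [buildAdj_aux_length]
  · simp
  · intro acc e
    match e with
    | [] => rfl
    | [u] => rfl
    | [u, v] => simp [addEdge_length]
    | u :: v :: w :: t => rfl

theorem buildAdj_bound (n : Nat) (edges : List (List Int))
    (hp : ∀ e ∈ edges, e.length = 2 ∧ ∀ x ∈ e, -(n : Int) ≤ x ∧ x < (n : Int)) :
    ∀ l ∈ buildAdj n edges, ∀ x ∈ l, x < n := by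
  unfold buildAdj
  suffices h : ∀ (acc : List (List Nat)), (∀ l ∈ acc, ∀ x ∈ l, x < n) →
      ∀ l ∈ edges.foldl (fun adj e =>
        match e with
        | [u, v] => addEdge (addEdge adj (normIdx n u) (normIdx n v)) (normIdx n v) (normIdx n u)
        | _ => adj) acc, ∀ x ∈ l, x < n by
    refine h _ ?_
    intro l hl
    rw [List.eq_of_mem_replicate hl]
    simp
  induction edges with
  | nil => intro acc hacc; exact hacc
  | cons e t ih =>
    intro acc hacc
    rw [List.foldl_cons]
    refine ih (fun e he => hp e (List.mem_cons_of_mem _ he)) _ ?_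
    obtain ⟨hlen2, hx⟩ := hp e List.mem_cons_self
    match e with
    | [u, v] =>
      have hu := hx u (by simp)
      have hv := hx v (by simp)
      exact addEdge_bound _ _ _
        (addEdge_bound _ _ _ hacc (normIdx_lt n v hv.1 hv.2))
        (normIdx_lt n u hu.1 hu.2)

-- ---- the inner (per-adjacency-list) simulation ----

theorem inner_sim (a : List Int) (adj : List (List Nat))
    (fuel : Nat) (ih : MainP a adj fuel) :
    ∀ (l : List Nat), (∀ x ∈ l, x < adj.length) →
    ∀ (vis : List Bool) (ord : List (Nat × Nat)) (w c : Int) (node : Nat),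
      vis.length = adj.length →
      node < adj.length →
      vis.getD node true = true →
      vis.count false ≤ fuel →
      Post a adj vis ord node w (l.foldl (stepA a adj fuel) (w, c, vis)).1
        c (l.foldl (stepA a adj fuel) (w, c, vis)).2.1
        (l.foldl (stepA a adj fuel) (w, c, vis)).2.2
        (l.foldl (stepB adj fuel node) (vis, ord)) := by
  intro l
  induction l with
  | nil =>
    intro _ vis ord w c node hlen hnode hvisnode hcnt
    refine ⟨[], by simp, rfl, by simp, by simp, by simp, by simp, by simp, ?_⟩
    intro sub ans hsublen hfresh
    refine ⟨by simp, by simp, by simp, by simp⟩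
  | cons x t iht =>
    intro hb vis ord w c node hlen hnode hvisnode hcnt
    have hxl : x < adj.length := hb x List.mem_cons_self
    by_cases hx : vis.getD x true = true
    · have hA : stepA a adj fuel (w, c, vis) x = (w, c, vis) := by
        unfold stepA; split
        · rfl
        · simp_all
      have hB : stepB adj fuel node (vis, ord) x = (vis, ord) := by
        unfold stepB; split
        · rfl
        · simp_all
      rw [List.foldl_cons, List.foldl_cons, hA, hB]
      exact iht (fun y hy => hb y (List.mem_cons_of_mem _ hy)) vis ord w c node hlen hnode hvisnode hcnt
    · have hx' : vis.getD x true = false := by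
        cases hvx : vis.getD x true
        · rfl
        · exact absurd hvx hx
      have hxlt : x < vis.length := lt_of_getD_false hx'
      have hnodex : node ≠ x := by
        intro h; rw [h] at hvisnode; rw [hvisnode] at hx'; cases hx'
      have hA : stepA a adj fuel (w, c, vis) x =
          (w + (solveA a adj fuel x (vis.set x true)).1.1,
           c + (solveA a adj fuel x (vis.set x true)).1.2,
           (solveA a adj fuel x (vis.set x true)).2) := by
        unfold stepA; split
        · simp_all
        · rfl
      have hB : stepB adj fuel node (vis, ord) x =
          dfsB adj fuel x (vis.set x true, ord ++ [(x, node)]) := by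
        unfold stepB; split
        · simp_all
        · rfl
      rw [List.foldl_cons, List.foldl_cons, hA, hB]
      set vis1 := vis.set x true with hvis1
      have hcnt1 : vis1.count false + 1 = vis.count false := count_false_set_true vis x hx'
      have hvis1x : vis1.getD x true = true := getD_set_self' vis x true true hxlt
      have hvis1y : ∀ y, vis1.getD y true = true ↔ (vis.getD y true = true ∨ y = x) := by
        intro y
        by_cases hyx : y = x
        · subst hyx; exact iff_of_true hvis1x (Or.inr rfl)
        · rw [getD_set_ne' vis true true (fun h => hyx h.symm)]
          simp [hyx]
      -- the recursive traversal from x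
      obtain ⟨L₁, hres1, hlen1, hiff1, hcnt1', hfresh1, hnodup1, hsum1, hsweep1⟩ :=
        ih x vis1 (ord ++ [(x, node)]) (by simp [hvis1, hlen]) hxl hvis1x (by omega)
      have hvis1node : vis1.getD node true = true := by
        rw [getD_set_ne' vis true true (fun h => hnodex h.symm)]; exact hvisnode
      have hr2node : ((solveA a adj fuel x vis1).2).getD node true = true :=
        (hiff1 node).2 (Or.inl hvis1node)
      have hr2x : ((solveA a adj fuel x vis1).2).getD x true = true :=
        (hiff1 x).2 (Or.inl hvis1x)
      have hr2len : ((solveA a adj fuel x vis1).2).length = adj.length := by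
        rw [hlen1]; simp [hvis1, hlen]
      have hr2cnt : ((solveA a adj fuel x vis1).2).count false ≤ fuel := by omega
      -- the rest of the adjacency list
      obtain ⟨L', hres', hlen', hiff', hcnt'', hfresh', hnodup', hsum', hsweep'⟩ :=
        iht (fun y hy => hb y (List.mem_cons_of_mem _ hy)) (solveA a adj fuel x vis1).2
          ((ord ++ [(x, node)]) ++ L₁)
          (w + (solveA a adj fuel x vis1).1.1) (c + (solveA a adj fuel x vis1).1.2) node
          hr2len hnode hr2node hr2cnt
      set r := solveA a adj fuel x vis1 with hr
      -- derived membership facts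
      have hfreshL1 : ∀ vp ∈ L₁, vp.1 < adj.length ∧ vis.getD vp.1 true = false := by
        intro vp hvp
        obtain ⟨h1, h2⟩ := hfresh1 vp hvp
        have hne : vp.1 ≠ x := by intro h; rw [h, hvis1x] at h2; cases h2
        refine ⟨h1, ?_⟩
        rw [← getD_set_ne' vis true true (fun h => hne h.symm)]; exact h2
      have hxnotL1 : x ∉ L₁.map Prod.fst := by
        intro hmem
        obtain ⟨vp, hvp, hfst⟩ := List.mem_map.1 hmem
        obtain ⟨_, h2⟩ := hfresh1 vp hvp
        rw [hfst, hvis1x] at h2; cases h2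
      have hnodeL1 : node ∉ L₁.map Prod.fst := by
        intro hmem
        obtain ⟨vp, hvp, hfst⟩ := List.mem_map.1 hmem
        obtain ⟨_, h2⟩ := hfresh1 vp hvp
        rw [hfst, hvis1node] at h2; cases h2
      have hr2false : ∀ y, (r.2 : List Bool).getD y true = false →
          vis1.getD y true = false ∧ y ∉ L₁.map Prod.fst := by
        intro y hy
        constructor
        · cases hv : vis1.getD y true
          · rfl
          · rw [(hiff1 y).2 (Or.inl hv)] at hy; cases hy
        · intro hmem
          rw [(hiff1 y).2 (Or.inr hmem)] at hy; cases hy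
      have hfreshL' : ∀ vp ∈ L', vp.1 < adj.length ∧ vis.getD vp.1 true = false := by
        intro vp hvp
        obtain ⟨h1, h2⟩ := hfresh' vp hvp
        obtain ⟨h3, _⟩ := hr2false vp.1 h2
        have hne : vp.1 ≠ x := by intro h; rw [h, hvis1x] at h3; cases h3
        refine ⟨h1, ?_⟩
        rw [← getD_set_ne' vis true true (fun h => hne h.symm)]; exact h3
      have hxnotL' : x ∉ L'.map Prod.fst := by
        intro hmem
        obtain ⟨vp, hvp, hfst⟩ := List.mem_map.1 hmem
        obtain ⟨_, h2⟩ := hfresh' vp hvp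
        rw [hfst, hr2x] at h2; cases h2
      have hnodeL' : node ∉ L'.map Prod.fst := by
        intro hmem
        obtain ⟨vp, hvp, hfst⟩ := List.mem_map.1 hmem
        obtain ⟨_, h2⟩ := hfresh' vp hvp
        rw [hfst, hr2node] at h2; cases h2
      have hdisj : (L₁.map Prod.fst).Disjoint (L'.map Prod.fst) := by
        intro y hy1 hy2
        obtain ⟨vp, hvp, hfst⟩ := List.mem_map.1 hy2
        obtain ⟨_, h2⟩ := hfresh' vp hvp
        obtain ⟨_, h4⟩ := hr2false vp.1 h2
        rw [hfst] at h4
        exact h4 hy1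
      -- assemble
      refine ⟨(x, node) :: (L₁ ++ L'), ?_, ?_, ?_, ?_, ?_, ?_, ?_, ?_⟩
      · rw [hres1, hres']
        simp
      · rw [hlen']; rw [hlen1]; simp [hvis1]
      · intro y
        rw [hiff' y, hiff1 y, hvis1y y]
        simp only [List.map_cons, List.map_append, List.mem_cons, List.mem_append]
        tauto
      · simp only [List.map_cons, List.map_append, List.length_cons, List.length_append,
          List.length_map] at *
        omega
      · intro vp hvp
        rcases List.mem_cons.1 hvp with rfl | hvp'
        · exact ⟨hxl, hx'⟩
        · rcases List.mem_append.1 hvp' with h | h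
          · exact hfreshL1 vp h
          · exact hfreshL' vp h
      · simp only [List.map_cons, List.map_append, List.nodup_cons, List.mem_append]
        refine ⟨fun h => ?_, List.Nodup.append hnodup1 hnodup' hdisj⟩
        rcases h with h | h
        · exact hxnotL1 h
        · exact hxnotL' h
      · simp only [List.map_cons, List.map_append, List.sum_cons, List.sum_append]
        omega
      · intro sub ans hsublen hfresh
        have hfreshx : sub.getD x 0 = a.getD x 0 := hfresh (x, node) List.mem_cons_self
        rw [List.reverse_cons, List.reverse_append, List.foldl_append, List.foldl_append,
          List.foldl_cons, List.foldl_nil]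
        -- stage 1 : the later siblings L'
        obtain ⟨hst1ans, hst1node, hst1off, hst1len⟩ :=
          hsweep' sub ans hsublen
            (fun vp hvp => hfresh vp (List.mem_cons_of_mem _ (List.mem_append_right _ hvp)))
        set st1 := List.foldl sweepStep (sub, ans) L'.reverse with hst1
        -- stage 2 : the subtree L₁ of x
        have hfresh2 : ∀ vp ∈ L₁, (st1.1 : List Int).getD vp.1 0 = a.getD vp.1 0 := by
          intro vp hvp
          have hnL' : vp.1 ∉ L'.map Prod.fst := fun h =>
            hdisj (List.mem_map.2 ⟨vp, hvp, rfl⟩) h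
          have hnn : vp.1 ≠ node := by
            intro h
            exact hnodeL1 (h ▸ List.mem_map.2 ⟨vp, hvp, rfl⟩)
          rw [hst1off vp.1 hnL' hnn]
          exact hfresh vp (List.mem_cons_of_mem _ (List.mem_append_left _ hvp))
        obtain ⟨hst2ans, hst2x, hst2off, hst2len⟩ :=
          hsweep1 st1.1 st1.2 (by rw [hst1len, hsublen]) hfresh2
        set st2 := List.foldl sweepStep (st1.1, st1.2) L₁.reverse with hst2
        -- values entering the final step
        have hs1x : (st1.1 : List Int).getD x 0 = a.getD x 0 := by
          rw [hst1off x hxnotL' (fun h => hnodex h.symm)]; exact hfreshx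
        have hs2x : (st2.1 : List Int).getD x 0 = r.1.1 := by
          rw [hst2x, hs1x]; ring
        have hs2node : (st2.1 : List Int).getD node 0 =
            sub.getD node 0 + ((t.foldl (stepA a adj fuel) (w + r.1.1, c + r.1.2, r.2)).1 - (w + r.1.1)) := by
          rw [hst2off node hnodeL1 hnodex, hst1node]
        have hnlt : node < (st2.1 : List Int).length := by
          rw [hst2len, hst1len, hsublen]; exact hnode
        refine ⟨?_, ?_, ?_, ?_⟩
        · simp only [sweepStep, hs2x, hst2ans, hst1ans]
          ring
        · simp only [sweepStep]
          rw [getD_set_self' _ _ _ _ hnlt, hs2node, hs2x]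
          ring
        · intro y hy hynode
          simp only [List.map_cons, List.map_append, List.mem_cons, List.mem_append] at hy
          push Not at hy
          obtain ⟨hyx, hyL1, hyL'⟩ := hy
          simp only [sweepStep]
          rw [getD_set_ne' _ _ _ (fun h => hynode h.symm), hst2off y hyL1 hyx, hst1off y hyL' hynode]
        · simp only [sweepStep, List.length_set]
          rw [hst2len, hst1len]

-- ---- the main simulation ----

theorem main_sim (a : List Int) (adj : List (List Nat))
    (Hadj : ∀ l ∈ adj, ∀ x ∈ l, x < adj.length) :
    ∀ fuel, MainP a adj fuel := by
  intro fuel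
  induction fuel with
  | zero => intro node vis ord _ _ _ hcnt; omega
  | succ fuel ih =>
    intro node vis ord hlen hnode hvisnode hcnt
    have hbound : ∀ x ∈ adj.getD node [], x < adj.length := getD_adj_bound adj Hadj node
    have H := inner_sim a adj fuel ih (adj.getD node []) hbound vis ord
      (a.getD node 0) 0 node hlen hnode hvisnode (by omega)
    rw [solveA_succ, dfsB_succ]
    set s := (adj.getD node []).foldl (stepA a adj fuel) (a.getD node 0, 0, vis) with hs
    have heq : pyabs s.1 + s.2.1 - pyabs s.1 = s.2.1 - 0 := by ring
    simpa [heq] using H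

-- ---- top-level ----

theorem replicate_set_getD (n : Nat) (hn : 0 < n) :
    ((List.replicate n false).set 0 true).getD 0 true = true := by
  apply getD_set_self'
  simp [hn]

theorem replicate_set_count (n : Nat) (hn : 0 < n) :
    ((List.replicate n false).set 0 true).count false + 1 = n := by
  have h : (List.replicate n false).getD 0 true = false := by
    rw [List.getD_eq_getElem?_getD, List.getElem?_replicate]
    simp [hn]
  rw [count_false_set_true _ _ h, List.count_replicate]
  simp

-- ===== VERDICT (by name: the statement is the Claim_ definition above) =====
theorem solution_spec : Claim_equal_solution := by
  intro a edges _ hpre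
  obtain ⟨hne, hedges⟩ := hpre
  have hn : 0 < a.length := List.length_pos_iff.2 hne
  unfold Spec_solution solution solution_alt
  dsimp only
  set n := a.length with hndef
  set adj := buildAdj n edges with hadj
  have hadjlen : adj.length = n := buildAdj_length n edges
  have hadjbound : ∀ l ∈ adj, ∀ x ∈ l, x < adj.length := by
    rw [hadjlen]; exact buildAdj_bound n edges hedges
  set vis0 := (List.replicate n false).set 0 true with hvis0
  have hv0len : vis0.length = adj.length := by simp [hvis0, hadjlen]
  have hv0get : vis0.getD 0 true = true := replicate_set_getD n hn
  have hv0cnt : vis0.count false < n := by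
    have h2 : vis0.count false + 1 = n := by rw [hvis0]; exact replicate_set_count n hn
    omega
  obtain ⟨L, hres, _, _, _, _, _, _, hsweep⟩ :=
    main_sim a adj hadjbound n 0 vis0 [] hv0len (by omega) hv0get hv0cnt
  obtain ⟨hans, hnode, _, _⟩ :=
    hsweep a 0 hadjlen.symm (fun vp _ => rfl)
  rw [hres]
  simp only [List.nil_append]
  rw [hans, hnode]
  set W := (solveA a adj n 0 vis0).1.1 with hW
  set C := (solveA a adj n 0 vis0).1.2 with hC
  have hval : a.getD 0 0 + (W - a.getD 0 0) = W := by ring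
  rw [hval]
  by_cases hw : W = 0
  · simp only [hw, if_true]
    simp [pyabs]
  · simp only [if_neg hw]
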